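-- pv_equiv track=rewrite | github.com/lorenzleutgeb/aoc | 14/1/solve.py | kh
-- ===== SOURCE A (Python) =====
-- def bitcount(n):
--     return (n &  1) + ((n &  2) >> 1) + ((n &  4) >> 2) + ((n &  8) >> 3) + ((n & 16) >> 4) + ((n & 32) >> 5) + ((n & 64) >> 6) + ((n & 128) >> 7)
--
-- def kh(raw):
--     lengths = (list(map(ord, raw))) + [17, 31, 73, 47, 23]
--
--     nums = list(range(0, 256))
--
--     current, skip = 0, 0
--
--     for i in range(0, 64):
--         for l in lengths:
--             for j in range(0, int(l / 2)):
--                 x = (current + j) % len(nums)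
--                 y = (current + l - j - 1) % len(nums)
--
--                 tmp = nums[x]
--                 nums[x] = nums[y]
--                 nums[y] = tmp
--
--             current = current + l + skip
--             skip = skip + 1
--
--     result = 0
--     for i in range(0, 16):
--         block = nums[i * 16]
--         for j in range(1, 16):
--             block = block ^ nums[i * 16 + j]
--
--         result += bitcount(block)
--
--     return result
-- ===== SOURCE B (Python) =====
-- def kh(raw):
--     lengths = [ord(c) for c in raw] + [17, 31, 73, 47, 23]
--
--     # Rotating-deque idiom on a plain list: the front of dq is always the
--     # current position; each step reverses the first l elements and rotates
--     # left by (l + skip).  total records the accumulated rotation.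
--     dq = list(range(256))
--     skip = 0
--     total = 0
--     for _ in range(64):
--         for l in lengths:
--             dq = dq[:l][::-1] + dq[l:]
--             k = (l + skip) % 256
--             dq = dq[k:] + dq[:k]
--             total += l + skip
--             skip += 1
--
--     # rotate right by total to restore absolute orientation
--     t = total % 256
--     nums = dq[-t:] + dq[:-t] if t else dq
--
--     result = 0
--     for i in range(0, 256, 16):
--         x = 0
--         for v in nums[i:i + 16]:
--             x ^= v
--         result += bin(x).count('1')
--     return result
-- ===== Notes on version B (the rewrite author's own statement) =====
-- stated objective: faster
-- what changed: Replaces A's fixed 256-slot array updated by per-element modular-index pair swaps (and its final manual masked bitcount) with the rotating-deque idiom: the list is kept rotated so the current position is always at the front, each step reverses the plain prefix and rotates left by l+skip as whole-list slice operations, the accumulated total rotation is undone once at the end, and bits are counted with the standard bin-and-count idiom.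
import Mathlib
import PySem

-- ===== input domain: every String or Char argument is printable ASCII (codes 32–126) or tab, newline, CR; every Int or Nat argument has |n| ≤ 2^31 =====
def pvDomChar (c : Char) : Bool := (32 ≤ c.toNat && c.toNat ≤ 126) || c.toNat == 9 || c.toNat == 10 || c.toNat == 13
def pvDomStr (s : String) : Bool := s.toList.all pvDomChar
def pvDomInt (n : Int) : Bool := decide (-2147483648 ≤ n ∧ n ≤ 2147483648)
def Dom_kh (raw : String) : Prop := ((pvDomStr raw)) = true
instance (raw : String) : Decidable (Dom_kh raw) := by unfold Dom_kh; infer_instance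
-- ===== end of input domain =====

-- B replaces A's fixed array with modular pair-swaps by the rotating-list (deque) idiom:
-- reverse the prefix, rotate left, undo the accumulated rotation at the end (objective: alternative).
-- All Python ints involved are nonnegative (character codes, counters, indices), so Nat arithmetic is exact.

-- ===== PORT A =====
def bitcount (n : Nat) : Nat :=
  (n &&& 1) + ((n &&& 2) >>> 1) + ((n &&& 4) >>> 2) + ((n &&& 8) >>> 3) +
  ((n &&& 16) >>> 4) + ((n &&& 32) >>> 5) + ((n &&& 64) >>> 6) + ((n &&& 128) >>> 7)

-- one `l` of A's inner loop: the modular pair-swap loop, then advance current/skip.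
-- state = (nums, current, skip); A's list indexing is always in range, so getD 0 is exact.
def khLen (st : List Nat × Nat × Nat) (l : Nat) : List Nat × Nat × Nat :=
  let nums := (List.range (l / 2)).foldl (fun ns j =>
    let x := (st.2.1 + j) % ns.length
    let y := (st.2.1 + l - j - 1) % ns.length
    (ns.set x (ns.getD y 0)).set y (ns.getD x 0)) st.1
  (nums, st.2.1 + l + st.2.2, st.2.2 + 1)

def kh (raw : String) : Int :=
  let lengths := raw.toList.map Char.toNat ++ [17, 31, 73, 47, 23]
  let st := (List.range 64).foldl (fun st _ => lengths.foldl khLen st) (List.range 256, 0, 0)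
  let nums := st.1
  ((List.range 16).foldl (fun r i =>
      r + bitcount ((List.range' 1 15).foldl (fun b j => b ^^^ nums.getD (i * 16 + j) 0)
        (nums.getD (i * 16) 0))) 0 : Nat)

-- ===== PORT B =====
-- one `l` of B's loop: reverse the first l elements, then rotate left by (l+skip) mod 256.
-- state = (dq, skip, total)
def khRot (st : List Nat × Nat × Nat) (l : Nat) : List Nat × Nat × Nat :=
  let dq := (st.1.take l).reverse ++ st.1.drop l
  let k := (l + st.2.1) % 256
  (dq.drop k ++ dq.take k, st.2.1 + 1, st.2.2 + l + st.2.1)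

def kh_alt (raw : String) : Int :=
  let lengths := raw.toList.map Char.toNat ++ [17, 31, 73, 47, 23]
  let st := (List.range 64).foldl (fun st _ => lengths.foldl khRot st) (List.range 256, 0, 0)
  let dq := st.1
  let t := st.2.2 % 256
  let nums := if t = 0 then dq else dq.drop (dq.length - t) ++ dq.take (dq.length - t)
  ((List.range' 0 16 16).foldl (fun r i =>
      r + (Nat.digits 2 (((nums.drop i).take 16).foldl (fun a v => a ^^^ v) 0)).sum) 0 : Nat)

-- ===== PRECONDITION & SPEC =====
def Spec_kh (raw : String) (out : Int) : Prop := out = kh_alt raw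
instance (raw : String) (out : Int) : Decidable (Spec_kh raw out) := by unfold Spec_kh; infer_instance

-- ===== CLAIM (what is proved, stated in full; the proofs are below) =====
def Claim_equal_kh : Prop := ∀ (raw : String), Dom_kh raw → Spec_kh raw (kh raw)

-- ===== LEMMAS AND PROOFS =====
set_option maxRecDepth 4000

-- rotate left by r
def rotL {α : Type} (r : Nat) (xs : List α) : List α := xs.drop r ++ xs.take r

-- Python's tmp-swap of positions i and j
def swapP (ns : List Nat) (i j : Nat) : List Nat :=
  (ns.set i (ns.getD j 0)).set j (ns.getD i 0)

-- A's swap at modular absolute indices; the plain swap j ↔ l-1-j on the rotated list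
def swMod (c l : Nat) (ns : List Nat) (j : Nat) : List Nat :=
  swapP ns ((c + j) % 256) ((c + l - j - 1) % 256)

def swPlain (l : Nat) (ns : List Nat) (j : Nat) : List Nat := swapP ns j (l - j - 1)

theorem rotL_length {α : Type} (r : Nat) (xs : List α) : (rotL r xs).length = xs.length := by
  simp [rotL]; omega

theorem rotL_zero {α : Type} (xs : List α) : rotL 0 xs = xs := by simp [rotL]

theorem rotL_getElem? {α : Type} (xs : List α) (r m : Nat) (hx : xs.length = 256)
    (hr : r < 256) (hm : m < 256) : (rotL r xs)[m]? = xs[(r + m) % 256]? := by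
  unfold rotL
  have hdl : (xs.drop r).length = 256 - r := by simp [hx]
  by_cases h : m < 256 - r
  · rw [List.getElem?_append_left (by omega), List.getElem?_drop]
    congr 1; omega
  · rw [List.getElem?_append_right (by omega), hdl, List.getElem?_take,
      if_pos (by omega)]
    congr 1; omega

theorem ext256 {α : Type} (xs ys : List α) (h : ∀ m, m < 256 → xs[m]? = ys[m]?)
    (hx : xs.length = 256) (hy : ys.length = 256) : xs = ys := by
  apply List.ext_getElem?
  intro n
  by_cases hn : n < 256
  · exact h n hn
  · rw [List.getElem?_eq_none (by omega), List.getElem?_eq_none (by omega)]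

theorem rotL_getD (xs : List Nat) (r m : Nat) (hx : xs.length = 256)
    (hr : r < 256) (hm : m < 256) : (rotL r xs).getD m 0 = xs.getD ((r + m) % 256) 0 := by
  simp [List.getD_eq_getElem?_getD, rotL_getElem? xs r m hx hr hm]

theorem rot_set (xs : List Nat) (r i : Nat) (v : Nat) (hx : xs.length = 256)
    (hr : r < 256) (hi : i < 256) :
    rotL r (xs.set ((r + i) % 256) v) = (rotL r xs).set i v := by
  apply ext256
  · intro m hm
    rw [rotL_getElem? _ r m (by simp [hx]) hr hm]
    by_cases hmi : m = i
    · subst hmi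
      rw [List.getElem?_set_self (by omega), List.getElem?_set_self (by rw [rotL_length]; omega)]
    · rw [List.getElem?_set_ne (by omega), List.getElem?_set_ne (by omega)]
      exact (rotL_getElem? xs r m hx hr hm).symm
  · rw [rotL_length]; simp [hx]
  · simp [rotL_length, hx]

theorem rot_rot {α : Type} (xs : List α) (a b : Nat) (hx : xs.length = 256)
    (ha : a < 256) (hb : b < 256) :
    rotL a (rotL b xs) = rotL ((b + a) % 256) xs := by
  apply ext256
  · intro m hm
    rw [rotL_getElem? _ a m (by rw [rotL_length, hx]) ha hm,
      rotL_getElem? xs b _ hx hb (by omega),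
      rotL_getElem? xs _ m hx (by omega) hm]
    congr 1; omega
  · simp [rotL_length, hx]
  · simp [rotL_length, hx]

theorem rot_swap (ns : List Nat) (r i j : Nat) (hx : ns.length = 256)
    (hr : r < 256) (hi : i < 256) (hj : j < 256) :
    rotL r (swapP ns ((r + i) % 256) ((r + j) % 256)) = swapP (rotL r ns) i j := by
  unfold swapP
  rw [(rotL_getD ns r j hx hr hj).symm, (rotL_getD ns r i hx hr hi).symm]
  rw [rot_set _ r j _ (by simp [hx]) hr hj, rot_set ns r i _ hx hr hi]

theorem foldl_congr_inv {α β : Type} (P : α → Prop) (f g : α → β → α)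
    (h1 : ∀ a b, P a → f a b = g a b) (h2 : ∀ a b, P a → P (g a b)) :
    ∀ (xs : List β) (a : α), P a → xs.foldl f a = xs.foldl g a
  | [], _, _ => rfl
  | x :: xs, a, ha => by
      simp only [List.foldl_cons]
      rw [h1 a x ha]
      exact foldl_congr_inv P f g h1 h2 xs (g a x) (h2 a x ha)

theorem foldl_preserve {α β : Type} (P : α → Prop) (f : α → β → α)
    (h : ∀ a b, P a → P (f a b)) :
    ∀ (xs : List β) (a : α), P a → P (xs.foldl f a)
  | [], _, ha => ha
  | x :: xs, a, ha => by
      simp only [List.foldl_cons]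
      exact foldl_preserve P f h xs (f a x) (h a x ha)

-- characterization of the pair-swap loop: after k swaps the outer k pairs are reversed
theorem swap_char (l : Nat) (hl : l ≤ 256) (xs : List Nat) (hx : xs.length = 256) :
    ∀ k, k ≤ l / 2 →
      ((List.range k).foldl (swPlain l) xs).length = 256 ∧
      ∀ m, ((List.range k).foldl (swPlain l) xs)[m]? =
        if m < k ∨ (l - k ≤ m ∧ m < l) then xs[l - 1 - m]? else xs[m]? := by
  intro k
  induction k with
  | zero =>
    intro _
    refine ⟨by simpa using hx, ?_⟩
    intro m
    rw [if_neg (by omega)]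
    simp
  | succ k ih =>
    intro hk
    obtain ⟨ihl, ihp⟩ := ih (by omega)
    have hkk : 2 * k + 2 ≤ l := by omega
    have hstep : (List.range (k + 1)).foldl (swPlain l) xs
        = swPlain l ((List.range k).foldl (swPlain l) xs) k := by
      rw [List.range_succ, List.foldl_append]; rfl
    set ys := (List.range k).foldl (swPlain l) xs with hysdef
    have hva : ys.getD k 0 = xs.getD k 0 := by
      rw [List.getD_eq_getElem?_getD, List.getD_eq_getElem?_getD, ihp k, if_neg (by omega)]
    have hvb : ys.getD (l - k - 1) 0 = xs.getD (l - k - 1) 0 := by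
      rw [List.getD_eq_getElem?_getD, List.getD_eq_getElem?_getD, ihp (l - k - 1),
        if_neg (by omega)]
    refine ⟨by simp [hstep, swPlain, swapP, ihl], ?_⟩
    intro m
    rw [hstep]
    show ((ys.set k (ys.getD (l - k - 1) 0)).set (l - k - 1) (ys.getD k 0))[m]? = _
    by_cases hm1 : m = l - k - 1
    · subst hm1
      rw [List.getElem?_set_self (by simp [ihl]; omega), hva]
      rw [if_pos (by omega)]
      have hix : l - 1 - (l - k - 1) = k := by omega
      rw [hix, List.getElem?_eq_getElem (by omega)]
      rw [List.getD_eq_getElem?_getD, List.getElem?_eq_getElem (show k < xs.length by omega)]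
      rfl
    · by_cases hm2 : m = k
      · subst hm2
        rw [List.getElem?_set_ne (by omega), List.getElem?_set_self (by omega), hvb]
        rw [if_pos (by omega)]
        have hix : l - 1 - m = l - m - 1 := by omega
        rw [hix, List.getElem?_eq_getElem (by omega)]
        rw [List.getD_eq_getElem?_getD,
          List.getElem?_eq_getElem (show l - m - 1 < xs.length by omega)]
        rfl
      · rw [List.getElem?_set_ne (by omega), List.getElem?_set_ne (by omega), ihp m]
        by_cases hc : m < k ∨ (l - k ≤ m ∧ m < l)
        · rw [if_pos hc, if_pos (by omega)]
        · rw [if_neg hc, if_neg (by omega)]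

-- the whole swap loop is a prefix reversal
theorem swap_fold_rev (l : Nat) (hl : l ≤ 256) (xs : List Nat) (hx : xs.length = 256) :
    (List.range (l / 2)).foldl (swPlain l) xs = (xs.take l).reverse ++ xs.drop l := by
  obtain ⟨hlen, hp⟩ := swap_char l hl xs hx (l / 2) le_rfl
  apply List.ext_getElem?
  intro m
  rw [hp m]
  have hlt : (xs.take l).length = l := by simp [hx]; omega
  by_cases hml : m < l
  · have hrhs : ((xs.take l).reverse ++ xs.drop l)[m]? = xs[l - 1 - m]? := by
      rw [List.getElem?_append_left (by simp [hlt]; omega),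
        List.getElem?_reverse (by simp [hlt]; omega), hlt, List.getElem?_take,
        if_pos (by omega)]
    rw [hrhs]
    by_cases hc : m < l / 2 ∨ l - l / 2 ≤ m ∧ m < l
    · rw [if_pos hc]
    · rw [if_neg hc]
      have : l - 1 - m = m := by omega
      rw [this]
  · have hrhs : ((xs.take l).reverse ++ xs.drop l)[m]? = xs[m]? := by
      rw [List.getElem?_append_right (by simp [hlt]; omega)]
      simp only [List.length_reverse, hlt]
      rw [List.getElem?_drop]
      congr 1; omega
    rw [hrhs, if_neg (by omega)]

-- A's literal inner loop equals the fixed-modulus swap fold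
theorem khLen_mod (nums : List Nat) (c s l : Nat) (hx : nums.length = 256) :
    (khLen (nums, c, s) l).1 = (List.range (l / 2)).foldl (swMod c l) nums := by
  have h : (khLen (nums, c, s) l).1 = (List.range (l / 2)).foldl (fun ns j =>
      (ns.set ((c + j) % ns.length) (ns.getD ((c + l - j - 1) % ns.length) 0)).set
        ((c + l - j - 1) % ns.length) (ns.getD ((c + j) % ns.length) 0)) nums := rfl
  rw [h]
  apply foldl_congr_inv (fun ns => ns.length = 256)
  · intro ns j hp
    simp only [swMod, swapP, hp]
  · intro ns j hp
    simp [swMod, swapP, hp]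
  · exact hx

-- the rotation carries A's modular swaps to plain prefix swaps
theorem rot_swap_fold (c l : Nat) (hl : l ≤ 256) :
    ∀ (js : List Nat), (∀ j ∈ js, j < l) → ∀ ns : List Nat, ns.length = 256 →
      rotL (c % 256) (js.foldl (swMod c l) ns) = js.foldl (swPlain l) (rotL (c % 256) ns) := by
  intro js
  induction js with
  | nil => intro _ ns _; rfl
  | cons j js ih =>
    intro hj ns hns
    have hjl : j < l := hj j (by simp)
    simp only [List.foldl_cons]
    rw [ih (fun x hx => hj x (by simp [hx])) _ (by simp [swMod, swapP, hns])]
    congr 1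
    have hx1 : (c + j) % 256 = (c % 256 + j) % 256 := by omega
    have hy1 : (c + l - j - 1) % 256 = (c % 256 + (l - j - 1)) % 256 := by omega
    unfold swMod
    rw [hx1, hy1,
      rot_swap ns (c % 256) j (l - j - 1) hns (by omega) (by omega) (by omega)]
    rfl

theorem getD_lt (ns : List Nat) (i : Nat) (hb : ∀ x ∈ ns, x < 256) : ns.getD i 0 < 256 := by
  rw [List.getD_eq_getElem?_getD]
  cases h : ns[i]? with
  | none => simp
  | some v => simpa using hb v (List.mem_of_getElem? h)

theorem swapP_bound (ns : List Nat) (i j : Nat) (hb : ∀ x ∈ ns, x < 256) :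
    ∀ x ∈ swapP ns i j, x < 256 := by
  intro x hx
  unfold swapP at hx
  rcases List.mem_or_eq_of_mem_set hx with h | h
  · rcases List.mem_or_eq_of_mem_set h with h' | h'
    · exact hb x h'
    · subst h'; exact getD_lt ns j hb
  · subst h; exact getD_lt ns i hb

-- the coupling invariant: B's deque is A's array rotated to the current position,
-- B's total is A's current pointer
def KInv (a b : List Nat × Nat × Nat) : Prop :=
  a.1.length = 256 ∧ (∀ x ∈ a.1, x < 256) ∧
  b.1 = rotL (a.2.1 % 256) a.1 ∧ b.2.1 = a.2.2 ∧ b.2.2 = a.2.1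

theorem KInv_step (a b : List Nat × Nat × Nat) (l : Nat) (hl : l ≤ 256) (h : KInv a b) :
    KInv (khLen a l) (khRot b l) := by
  obtain ⟨nums, c, s⟩ := a
  obtain ⟨dq, bs, bt⟩ := b
  obtain ⟨h1, h2, h3, h4, h5⟩ := h
  simp only at h1 h2 h3 h4 h5
  rw [h3, h4, h5]
  have hA1 : (khLen (nums, c, s) l).1 = (List.range (l / 2)).foldl (swMod c l) nums :=
    khLen_mod nums c s l h1
  have hlenA : ((khLen (nums, c, s) l).1).length = 256 := by
    rw [hA1]
    exact foldl_preserve (fun ns => ns.length = 256) (swMod c l)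
      (fun ns j hp => by simp [swMod, swapP, hp]) _ nums h1
  have hbndA : ∀ x ∈ (khLen (nums, c, s) l).1, x < 256 := by
    rw [hA1]
    exact foldl_preserve (fun ns => ∀ x ∈ ns, x < 256) (swMod c l)
      (fun ns j hp => swapP_bound ns _ _ hp) _ nums h2
  refine ⟨hlenA, hbndA, ?_, rfl, rfl⟩
  -- rotation component
  have hrev : ((rotL (c % 256) nums).take l).reverse ++ (rotL (c % 256) nums).drop l
      = rotL (c % 256) ((khLen (nums, c, s) l).1) := by
    rw [hA1, rot_swap_fold c l hl _ (fun j hj => by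
        have := List.mem_range.1 hj; omega) nums h1,
      swap_fold_rev l hl _ (by rw [rotL_length]; exact h1)]
  show rotL ((l + s) % 256) (((rotL (c % 256) nums).take l).reverse ++ (rotL (c % 256) nums).drop l)
    = rotL ((c + l + s) % 256) (khLen (nums, c, s) l).1
  rw [hrev, rot_rot _ _ _ hlenA (by omega) (by omega)]
  congr 1
  omega

theorem KInv_foldLen (lengths : List Nat) (hb : ∀ l ∈ lengths, l ≤ 256) :
    ∀ (a b : List Nat × Nat × Nat), KInv a b →
      KInv (lengths.foldl khLen a) (lengths.foldl khRot b) := by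
  induction lengths with
  | nil => intro a b h; exact h
  | cons l ls ih =>
    intro a b h
    simp only [List.foldl_cons]
    exact ih (fun x hx => hb x (by simp [hx])) _ _ (KInv_step a b l (hb l (by simp)) h)

theorem KInv_rounds (lengths : List Nat) (hb : ∀ l ∈ lengths, l ≤ 256) :
    ∀ (rs : List Nat) (a b : List Nat × Nat × Nat), KInv a b →
      KInv (rs.foldl (fun st _ => lengths.foldl khLen st) a)
          (rs.foldl (fun st _ => lengths.foldl khRot st) b) := by
  intro rs
  induction rs with
  | nil => intro a b h; exact h
  | cons r rs ih =>
    intro a b h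
    simp only [List.foldl_cons]
    exact ih _ _ (KInv_foldLen lengths hb a b h)

-- ===== the final digest stage =====

theorem slice_map (nums : List Nat) (a : Nat) (hx : nums.length = 256) (ha : a + 16 ≤ 256) :
    (nums.drop a).take 16 = (List.range 16).map (fun j => nums.getD (a + j) 0) := by
  apply List.ext_getElem?
  intro m
  by_cases hm : m < 16
  · rw [List.getElem?_take, if_pos hm, List.getElem?_drop,
      List.getElem?_map, List.getElem?_range hm,
      List.getElem?_eq_getElem (show a + m < nums.length by omega)]
    simp [List.getD_eq_getElem?_getD,
      List.getElem?_eq_getElem (show a + m < nums.length by omega)]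
  · rw [List.getElem?_take, if_neg hm, List.getElem?_eq_none (by simp; omega)]

theorem block_eq (nums : List Nat) (a : Nat) (hx : nums.length = 256) (ha : a + 16 ≤ 256) :
    ((nums.drop a).take 16).foldl (fun x v => x ^^^ v) 0
      = (List.range' 1 15).foldl (fun b j => b ^^^ nums.getD (a + j) 0) (nums.getD a 0) := by
  rw [slice_map nums a hx ha, List.foldl_map]
  have h16 : List.range 16 = 0 :: List.range' 1 15 := by decide
  rw [h16, List.foldl_cons]
  congr 1
  simp

theorem xor_fold_lt : ∀ (vs : List Nat), (∀ v ∈ vs, v < 256) → ∀ b, b < 256 →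
    vs.foldl (fun a v => a ^^^ v) b < 256 := by
  intro vs
  induction vs with
  | nil => intro _ b hb; simpa using hb
  | cons v vs ih =>
    intro h b hb
    simp only [List.foldl_cons]
    refine ih (fun x hx => h x (by simp [hx])) _ ?_
    have h1 : b < 2 ^ 8 := by norm_num at hb ⊢; omega
    have h2 : v < 2 ^ 8 := by have := h v (by simp); norm_num; omega
    have := Nat.xor_lt_two_pow h1 h2
    norm_num at this; omega

theorem bc_digits : ∀ n, n < 256 → (Nat.digits 2 n).sum = bitcount n := by decide

theorem final_eq (nums : List Nat) (hx : nums.length = 256) (hb : ∀ x ∈ nums, x < 256) :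
    ((List.range' 0 16 16).foldl (fun r i =>
        r + (Nat.digits 2 (((nums.drop i).take 16).foldl (fun a v => a ^^^ v) 0)).sum) 0)
    = (List.range 16).foldl (fun r i =>
        r + bitcount ((List.range' 1 15).foldl (fun b j => b ^^^ nums.getD (i * 16 + j) 0)
          (nums.getD (i * 16) 0))) 0 := by
  have hr : List.range' 0 16 16 = (List.range 16).map (fun i => i * 16) := by decide
  rw [hr, List.foldl_map]
  apply PySem.List.foldl_congr_mem
  intro r i hi
  have hi16 : i < 16 := List.mem_range.1 hi
  have hlt : ((nums.drop (i * 16)).take 16).foldl (fun a v => a ^^^ v) 0 < 256 := by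
    refine xor_fold_lt _ ?_ 0 (by norm_num)
    intro v hv
    exact hb v (List.mem_of_mem_drop (List.mem_of_mem_take hv))
  rw [block_eq nums (i * 16) hx (by omega)] at hlt ⊢
  rw [bc_digits _ hlt]

-- ===== assembly =====

theorem lengths_le (raw : String) (h : Dom_kh raw) :
    ∀ l ∈ raw.toList.map Char.toNat ++ [17, 31, 73, 47, 23], l ≤ 256 := by
  intro l hl
  rcases List.mem_append.1 hl with h1 | h1
  · obtain ⟨c, hc, rfl⟩ := List.mem_map.1 h1
    have hc' : pvDomChar c = true := by
      have := (List.all_eq_true.1 h) c hc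
      exact this
    simp only [pvDomChar, Bool.or_eq_true, Bool.and_eq_true, beq_iff_eq,
      decide_eq_true_eq] at hc'
    omega
  · fin_cases h1 <;> norm_num

-- ===== VERDICT (by name: the statement is the Claim_ definition above) =====
theorem kh_spec : Claim_equal_kh := by
  intro raw hdom
  simp only [Spec_kh, kh, kh_alt]
  have hInv : KInv
      ((List.range 64).foldl
        (fun st _ => (raw.toList.map Char.toNat ++ [17, 31, 73, 47, 23]).foldl khLen st)
        (List.range 256, 0, 0))
      ((List.range 64).foldl
        (fun st _ => (raw.toList.map Char.toNat ++ [17, 31, 73, 47, 23]).foldl khRot st)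
        (List.range 256, 0, 0)) := by
    apply KInv_rounds _ (lengths_le raw hdom)
    refine ⟨by simp, ?_, ?_, rfl, rfl⟩
    · intro x hx; simpa using List.mem_range.1 hx
    · show List.range 256 = rotL (0 % 256) (List.range 256)
      rw [Nat.zero_mod, rotL_zero]
  set stA := (List.range 64).foldl
      (fun st _ => (raw.toList.map Char.toNat ++ [17, 31, 73, 47, 23]).foldl khLen st)
      (List.range 256, 0, 0) with hstA
  set stB := (List.range 64).foldl
      (fun st _ => (raw.toList.map Char.toNat ++ [17, 31, 73, 47, 23]).foldl khRot st)
      (List.range 256, 0, 0) with hstB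
  obtain ⟨h1, h2, h3, h4, h5⟩ := hInv
  have hlenB : stB.1.length = 256 := by rw [h3, rotL_length]; exact h1
  have hnb : (if stB.2.2 % 256 = 0 then stB.1
      else stB.1.drop (stB.1.length - stB.2.2 % 256) ++ stB.1.take (stB.1.length - stB.2.2 % 256))
      = stA.1 := by
    rw [h5, h3, rotL_length, h1]
    by_cases h0 : stA.2.1 % 256 = 0
    · rw [if_pos h0, h0, rotL_zero]
    · rw [if_neg h0]
      show rotL (256 - stA.2.1 % 256) (rotL (stA.2.1 % 256) stA.1) = stA.1
      rw [rot_rot _ _ _ h1 (by omega) (by omega)]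
      have : (stA.2.1 % 256 + (256 - stA.2.1 % 256)) % 256 = 0 := by omega
      rw [this, rotL_zero]
  rw [hnb, final_eq stA.1 h1 h2]
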